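-- pv_equiv track=rewrite | github.com/RexWzh/rubik_cube.py | rubik/tools.py | face_rotate
-- ===== SOURCE A (Python) =====
-- def face_rotate(state, deg):
--     """魔方面顺时针旋转 90°"""
--     deg %= 4
--     if deg == 0: return state
--     order = (6, 3, 0, 7, 4, 1, 8, 5, 2)
--     if isinstance(state, str): # 对 state 类型进行派发
--         state = ''.join(state[i] for i in order)
--     elif isinstance(state, list):
--         state = [state[i] for i in order]
--     return face_rotate(state, deg - 1)
-- ===== SOURCE B (Python) =====
-- def face_rotate(state, deg):
--     """Rotate a 9-element cube face clockwise by deg quarter turns, in one pass."""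
--     deg %= 4
--     if deg == 0:
--         return state
--     perms = [None,
--              (6, 3, 0, 7, 4, 1, 8, 5, 2),
--              (8, 7, 6, 5, 4, 3, 2, 1, 0),
--              (2, 5, 8, 1, 4, 7, 0, 3, 6)]
--     perm = perms[deg]
--     if isinstance(state, str):
--         return ''.join(state[i] for i in perm)
--     if isinstance(state, list):
--         return [state[i] for i in perm]
--     return state
-- ===== Notes on version B (the rewrite author's own statement) =====
-- stated objective: simpler
-- what changed: B applies a single precomposed permutation (a 4-entry table of index tuples) in one pass instead of recursing deg%4 times, each time rebuilding the face.
import Mathlib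
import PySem

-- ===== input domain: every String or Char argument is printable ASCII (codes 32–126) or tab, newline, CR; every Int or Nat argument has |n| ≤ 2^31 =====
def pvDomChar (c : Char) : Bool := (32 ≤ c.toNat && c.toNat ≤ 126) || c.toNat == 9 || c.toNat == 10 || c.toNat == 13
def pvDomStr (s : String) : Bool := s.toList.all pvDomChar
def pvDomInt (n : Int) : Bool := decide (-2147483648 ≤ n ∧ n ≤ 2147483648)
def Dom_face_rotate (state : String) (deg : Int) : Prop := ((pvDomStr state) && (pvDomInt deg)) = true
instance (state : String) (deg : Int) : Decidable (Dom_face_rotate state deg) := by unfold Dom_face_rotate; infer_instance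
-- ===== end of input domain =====

-- B replaces A's deg%4-fold recursion by one pass with a precomposed permutation table (objective: simpler).

-- ===== PORT A =====
-- A recurses with deg-1 after `deg %= 4`; since 0 <= deg%4 < 4 the re-applied `%= 4` is the
-- identity on the decremented counter, so the recursion is carried structurally as that Nat counter.
def face_rotate_go : String -> Nat -> String
  | state, 0 => state
  | state, Nat.succ n =>
      let order : List Int := [6, 3, 0, 7, 4, 1, 8, 5, 2]
      face_rotate_go (String.ofList (order.map (fun i => PySem.List.pyGetD state.toList i ' '))) n

def face_rotate (state : String) (deg : Int) : String :=
  face_rotate_go state (PySem.Int.mod deg 4).toNat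

-- ===== PORT B =====
def face_rotate_alt (state : String) (deg : Int) : String :=
  let d := PySem.Int.mod deg 4
  if d = 0 then state
  else
    let perms : List (List Int) :=
      [[], [6, 3, 0, 7, 4, 1, 8, 5, 2], [8, 7, 6, 5, 4, 3, 2, 1, 0], [2, 5, 8, 1, 4, 7, 0, 3, 6]]
    let perm := PySem.List.pyGetD perms d []
    String.ofList (perm.map (fun i => PySem.List.pyGetD state.toList i ' '))

-- ===== PRECONDITION & SPEC =====
-- Pre_ excludes exactly the inputs where A raises IndexError: deg % 4 ≠ 0 with fewer than 9 characters.
def Pre_face_rotate (state : String) (deg : Int) : Prop :=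
  PySem.Int.mod deg 4 = 0 ∨ 9 ≤ state.toList.length
instance (state : String) (deg : Int) : Decidable (Pre_face_rotate state deg) := by
  unfold Pre_face_rotate; infer_instance
def pvWitness_face_rotate : String × Int := ("abcdefghi", 3)

def Spec_face_rotate (state : String) (deg : Int) (out : String) : Prop := out = face_rotate_alt state deg
instance (state : String) (deg : Int) (out : String) : Decidable (Spec_face_rotate state deg out) := by unfold Spec_face_rotate; infer_instance

-- ===== CLAIM (what is proved, stated in full; the proofs are below) =====
def Claim_equal_face_rotate : Prop := ∀ (state : String) (deg : Int), Dom_face_rotate state deg → Pre_face_rotate state deg → Spec_face_rotate state deg (face_rotate state deg)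

-- ===== LEMMAS AND PROOFS =====

theorem decomp9 (l : List Char) (h : 9 ≤ l.length) :
    ∃ c0 c1 c2 c3 c4 c5 c6 c7 c8 rest,
      l = c0 :: c1 :: c2 :: c3 :: c4 :: c5 :: c6 :: c7 :: c8 :: rest := by
  match l with
  | c0 :: c1 :: c2 :: c3 :: c4 :: c5 :: c6 :: c7 :: c8 :: rest =>
    exact ⟨c0, c1, c2, c3, c4, c5, c6, c7, c8, rest, rfl⟩

theorem rot9 (c0 c1 c2 c3 c4 c5 c6 c7 c8 : Char) (rest : List Char) :
    ([6, 3, 0, 7, 4, 1, 8, 5, 2] : List Int).map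
      (fun i => PySem.List.pyGetD (c0 :: c1 :: c2 :: c3 :: c4 :: c5 :: c6 :: c7 :: c8 :: rest) i ' ')
      = [c6, c3, c0, c7, c4, c1, c8, c5, c2] := by
  simp [PySem.List.pyGetD_ofNat']

-- ===== VERDICT (by name: the statement is the Claim_ definition above) =====
-- one clockwise quarter-turn, as A's loop body computes it (proof-side abbreviation)
def rotA (s : String) : String :=
  String.ofList (([6, 3, 0, 7, 4, 1, 8, 5, 2] : List Int).map (fun i => PySem.List.pyGetD s.toList i ' '))

theorem go_one (s : String) : face_rotate_go s 1 = rotA s := rfl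
theorem go_two (s : String) : face_rotate_go s 2 = rotA (rotA s) := rfl
theorem go_three (s : String) : face_rotate_go s 3 = rotA (rotA (rotA s)) := rfl

theorem rotA_eq (s : String) (c0 c1 c2 c3 c4 c5 c6 c7 c8 : Char) (rest : List Char)
    (h : s.toList = c0 :: c1 :: c2 :: c3 :: c4 :: c5 :: c6 :: c7 :: c8 :: rest) :
    rotA s = String.ofList [c6, c3, c0, c7, c4, c1, c8, c5, c2] := by
  unfold rotA
  rw [h, rot9]

theorem face_rotate_spec : Claim_equal_face_rotate := by
  intro state deg _ hpre
  unfold Spec_face_rotate face_rotate face_rotate_alt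
  by_cases h0 : PySem.Int.mod deg 4 = 0
  · rw [h0]
    norm_num [face_rotate_go]
  · have hlen : 9 ≤ state.toList.length := hpre.resolve_left h0
    obtain ⟨c0, c1, c2, c3, c4, c5, c6, c7, c8, rest, hl⟩ := decomp9 _ hlen
    have hr : PySem.Int.mod deg 4 = 1 ∨ PySem.Int.mod deg 4 = 2 ∨ PySem.Int.mod deg 4 = 3 := by
      simp only [PySem.Int.mod, Int.fmod_eq_emod] at h0 ⊢
      omega
    rcases hr with hr | hr | hr
    · rw [hr, show (1 : Int).toNat = 1 from rfl, go_one,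
        rotA_eq state c0 c1 c2 c3 c4 c5 c6 c7 c8 rest hl]
      norm_num [hl, PySem.List.pyGetD_ofNat']
    · rw [hr, show (2 : Int).toNat = 2 from rfl, go_two,
        rotA_eq state c0 c1 c2 c3 c4 c5 c6 c7 c8 rest hl,
        rotA_eq (String.ofList [c6, c3, c0, c7, c4, c1, c8, c5, c2]) c6 c3 c0 c7 c4 c1 c8 c5 c2 [] (by simp)]
      norm_num [hl, PySem.List.pyGetD_ofNat']
    · rw [hr, show (3 : Int).toNat = 3 from rfl, go_three,
        rotA_eq state c0 c1 c2 c3 c4 c5 c6 c7 c8 rest hl,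
        rotA_eq (String.ofList [c6, c3, c0, c7, c4, c1, c8, c5, c2]) c6 c3 c0 c7 c4 c1 c8 c5 c2 [] (by simp),
        rotA_eq (String.ofList [c8, c7, c6, c5, c4, c3, c2, c1, c0]) c8 c7 c6 c5 c4 c3 c2 c1 c0 [] (by simp)]
      norm_num [hl, PySem.List.pyGetD_ofNat']
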